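-- pv_equiv track=rewrite | github.com/GiselleGewelle/unik-works | lab6.py | virus_count
-- ===== SOURCE A (Python) =====
-- def virus_count(hours: int):
--     amount = 1
--     bac = 0
--     for min in range(hours * 60 + 1):
--         if bac >= 100:
--             amount += 1
--             bac = bac % 100
--         bac += 4 * amount
--     return amount
-- ===== SOURCE B (Python) =====
-- def virus_count(hours: int):
--     remaining = hours * 60 + 1
--     if remaining < 0:
--         remaining = 0
--     amount, bac = 1, 0
--     # bounded startup: once amount reaches 25, every further minute adds exactly 1
--     while remaining > 0 and amount < 25:
--         if bac >= 100:
--             amount += 1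
--             bac %= 100
--         bac += 4 * amount
--         remaining -= 1
--     return amount + remaining
-- ===== Notes on version B (the rewrite author's own statement) =====
-- stated objective: faster
-- what changed: B simulates only a short bounded startup phase until the per-minute growth increment reaches the rollover modulus (from then on the count provably grows by exactly one each minute) and adds the remaining minutes in closed form, instead of A's simulation of every minute.
import Mathlib
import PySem

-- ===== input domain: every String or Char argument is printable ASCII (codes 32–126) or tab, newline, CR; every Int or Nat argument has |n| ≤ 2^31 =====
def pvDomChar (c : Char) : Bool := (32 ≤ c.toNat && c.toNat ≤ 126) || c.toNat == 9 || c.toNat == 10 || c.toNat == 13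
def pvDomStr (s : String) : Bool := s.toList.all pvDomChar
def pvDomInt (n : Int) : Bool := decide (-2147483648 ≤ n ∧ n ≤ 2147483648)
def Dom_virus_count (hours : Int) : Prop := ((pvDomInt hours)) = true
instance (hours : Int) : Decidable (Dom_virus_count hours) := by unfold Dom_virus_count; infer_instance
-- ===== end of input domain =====

-- B replaces A's minute-by-minute simulation by a bounded startup loop (stops once amount ≥ 25,
-- after which each minute increments amount by exactly 1) plus a closed-form linear tail: O(1) vs O(hours).

-- ===== PORT A =====
def virus_count (hours : Int) : Int :=
  -- for min in range(hours * 60 + 1): body over state (amount, bac), starting (1, 0)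
  ((PySem.List.pyRange 0 (hours * 60 + 1) 1).foldl
    (fun s _ =>
      let (amount, bac) :=
        if s.2 ≥ 100 then (s.1 + 1, PySem.Int.mod s.2 100) else (s.1, s.2)
      (amount, bac + 4 * amount))
    (1, 0)).1

-- ===== PORT B =====
-- the while loop of Source B, recursion on the (clamped) remaining minute count
def pvLoopB : Nat → Int → Int → Int
  | 0, amount, _ => amount
  | Nat.succ n, amount, bac =>
    if amount < 25 then
      if bac ≥ 100 then
        pvLoopB n (amount + 1) (PySem.Int.mod bac 100 + 4 * (amount + 1))
      else
        pvLoopB n amount (bac + 4 * amount)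
    else
      amount + (Nat.succ n : Int)   -- return amount + remaining

def virus_count_alt (hours : Int) : Int :=
  pvLoopB (hours * 60 + 1).toNat 1 0

-- ===== PRECONDITION & SPEC =====
def Spec_virus_count (hours : Int) (out : Int) : Prop := out = virus_count_alt hours
instance (hours : Int) (out : Int) : Decidable (Spec_virus_count hours out) := by unfold Spec_virus_count; infer_instance

-- ===== CLAIM (what is proved, stated in full; the proofs are below) =====
def Claim_equal_virus_count : Prop := ∀ (hours : Int), Dom_virus_count hours → Spec_virus_count hours (virus_count hours)

-- ===== LEMMAS AND PROOFS =====

-- one minute of A's simulation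
def pvStep (s : Int × Int) : Int × Int :=
  if s.2 ≥ 100 then (s.1 + 1, PySem.Int.mod s.2 100 + 4 * (s.1 + 1))
  else (s.1, s.2 + 4 * s.1)

lemma pvBody_eq_step (s : Int × Int) :
    ((if s.2 ≥ 100 then (s.1 + 1, PySem.Int.mod s.2 100) else (s.1, s.2)).1,
     (if s.2 ≥ 100 then (s.1 + 1, PySem.Int.mod s.2 100) else (s.1, s.2)).2 +
       4 * (if s.2 ≥ 100 then (s.1 + 1, PySem.Int.mod s.2 100) else (s.1, s.2)).1) = pvStep s := by
  unfold pvStep; split_ifs <;> rfl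

lemma pvFoldl_eq_iterate (l : List Int) (s : Int × Int) :
    l.foldl (fun s _ =>
      let (amount, bac) :=
        if s.2 ≥ 100 then (s.1 + 1, PySem.Int.mod s.2 100) else (s.1, s.2)
      (amount, bac + 4 * amount)) s = pvStep^[l.length] s := by
  induction l generalizing s with
  | nil => rfl
  | cons x xs ih =>
      simp only [List.foldl_cons, List.length_cons, Function.iterate_succ_apply, ih]
      rw [pvBody_eq_step]

lemma pvIter_high : ∀ (n : Nat) (a b : Int), 25 ≤ a → 100 ≤ b →
    (pvStep^[n] (a, b)).1 = a + n := by
  intro n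
  induction n with
  | zero => intro a b _ _; simp
  | succ n ih =>
      intro a b ha hb
      rw [Function.iterate_succ_apply]
      have hstep : pvStep (a, b) = (a + 1, PySem.Int.mod b 100 + 4 * (a + 1)) := by
        unfold pvStep; simp [hb]
      rw [hstep, ih (a + 1) _ (by omega)
        (by have := PySem.Int.mod_nonneg b (b := (100 : Int)) (by norm_num); omega)]
      push_cast; ring

lemma pvLoopB_eq_iterate : ∀ (n : Nat) (a b : Int), 1 ≤ a → (25 ≤ a → 100 ≤ b) →
    pvLoopB n a b = (pvStep^[n] (a, b)).1 := by
  intro n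
  induction n with
  | zero => intro a b _ _; rfl
  | succ n ih =>
      intro a b ha hinv
      by_cases hlt : a < 25
      · rw [Function.iterate_succ_apply]
        by_cases hb : b ≥ 100
        · have hstep : pvStep (a, b) = (a + 1, PySem.Int.mod b 100 + 4 * (a + 1)) := by
            unfold pvStep; simp [hb]
          rw [hstep, ← ih (a + 1) _ (by omega)
            (by intro h25
                have := PySem.Int.mod_nonneg b (b := (100 : Int)) (by norm_num)
                omega)]
          simp [pvLoopB, hlt, hb]
        · have hstep : pvStep (a, b) = (a, b + 4 * a) := by
            unfold pvStep; simp [hb]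
          rw [hstep, ← ih a _ ha (by intro h25; omega)]
          simp [pvLoopB, hlt, hb]
      · have h25 : 25 ≤ a := by omega
        rw [pvIter_high (n + 1) a b h25 (hinv h25)]
        simp [pvLoopB, hlt]

-- ===== VERDICT (by name: the statement is the Claim_ definition above) =====
theorem virus_count_spec : Claim_equal_virus_count := by
  intro hours _
  unfold Spec_virus_count virus_count virus_count_alt
  rw [pvFoldl_eq_iterate, PySem.List.length_pyRange_one,
    pvLoopB_eq_iterate _ 1 0 (by norm_num) (by intro h; omega)]
  norm_num
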